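-- pv_equiv track=rewrite | github.com/vm7608/AI-Research | 04_Leetcode/2294.py | partitionArray
-- ===== SOURCE A (Python) =====
-- from typing import List
--
-- def partitionArray(nums: List[int], k: int) -> int:
--     nums.sort()
--     ans = 1
--     temp = nums[0]
--     for i in range(1, len(nums)):
--         if nums[i] > (temp + k):
--             ans += 1
--             temp = nums[i]
--     return ans
-- ===== SOURCE B (Python) =====
-- from bisect import bisect_right
-- from typing import List
--
--
-- def partitionArray(nums: List[int], k: int) -> int:
--     # Sort in place (same observable mutation as the original), then jump over
--     # whole groups with binary search instead of testing every element.
--     nums.sort()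
--     ans = 1
--     temp = nums[0]
--     i = bisect_right(nums, temp + k, 1)
--     while i < len(nums):
--         ans += 1
--         temp = nums[i]
--         i = bisect_right(nums, temp + k, i + 1)
--     return ans
-- ===== Notes on version B (the rewrite author's own statement) =====
-- stated objective: alternative
-- what changed: After the shared sort, the per-element linear scan with a branch is replaced by bisect_right binary-search jumps from one group boundary to the next.
-- outside the precondition, e.g. on partitionArray([], 0): A raises IndexError, B raises IndexError
import Mathlib
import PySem

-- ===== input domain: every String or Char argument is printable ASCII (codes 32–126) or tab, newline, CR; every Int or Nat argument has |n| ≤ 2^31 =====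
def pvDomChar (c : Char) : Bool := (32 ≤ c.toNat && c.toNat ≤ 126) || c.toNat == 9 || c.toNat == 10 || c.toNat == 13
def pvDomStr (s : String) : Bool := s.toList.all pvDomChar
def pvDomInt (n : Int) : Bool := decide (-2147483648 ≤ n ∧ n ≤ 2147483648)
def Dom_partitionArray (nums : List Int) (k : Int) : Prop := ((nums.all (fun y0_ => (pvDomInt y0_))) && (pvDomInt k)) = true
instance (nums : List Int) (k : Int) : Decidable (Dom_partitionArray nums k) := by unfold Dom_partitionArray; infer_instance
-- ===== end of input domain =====

-- B replaces A's per-element linear scan (after the shared in-place sort, which both perform)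
-- by bisect_right binary-search jumps from one group boundary to the next; equal return values proved.


-- ===== PORT A =====
def stepA (k : Int) (st : Int × Int) (x : Int) : Int × Int :=
  if x > st.2 + k then (st.1 + 1, x) else st

def partitionArray (nums : List Int) (k : Int) : Int :=
  let s := PySem.List.sorted nums (fun x => x) false
  match s with
  | [] => 0          -- Python raises IndexError here; excluded by Pre_
  | t :: rest => (rest.foldl (stepA k) (1, t)).1

-- ===== PORT B =====
-- bisect.bisect_right(s, x, lo): exact on the sorted lists B calls it on
def bisR (s : List Int) (x : Int) (lo : Nat) : Nat :=
  lo + PySem.List.bisectRight (s.drop lo) x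

def altLoop (s : List Int) (k : Int) (i : Nat) (ans : Int) : Int :=
  if h : i < s.length then
    altLoop s k (bisR s (s[i] + k) (i + 1)) (ans + 1)
  else ans
termination_by s.length - i
decreasing_by simp only [bisR]; omega

def partitionArray_alt (nums : List Int) (k : Int) : Int :=
  let s := PySem.List.sorted nums (fun x => x) false
  match s with
  | [] => 0          -- Python raises IndexError here; excluded by Pre_
  | t :: _ => altLoop s k (bisR s (t + k) 1) 1

-- ===== PRECONDITION & SPEC =====
-- Pre_ excludes only the empty list, on which A (and B) raise IndexError at nums[0].
def Pre_partitionArray (nums : List Int) (k : Int) : Prop := nums ≠ []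
instance (nums : List Int) (k : Int) : Decidable (Pre_partitionArray nums k) := by unfold Pre_partitionArray; infer_instance
def pvWitness_partitionArray : List Int × Int := ([3, 6, 1, 2, 5], 2)

def Spec_partitionArray (nums : List Int) (k : Int) (out : Int) : Prop := out = partitionArray_alt nums k
instance (nums : List Int) (k : Int) (out : Int) : Decidable (Spec_partitionArray nums k out) := by unfold Spec_partitionArray; infer_instance

-- ===== CLAIM (what is proved, stated in full; the proofs are below) =====
def Claim_equal_partitionArray : Prop := ∀ (nums : List Int) (k : Int), Dom_partitionArray nums k → Pre_partitionArray nums k → Spec_partitionArray nums k (partitionArray nums k)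

-- ===== LEMMAS AND PROOFS =====

-- Elements ≤ temp + k leave A's fold state unchanged.
lemma foldA_skip (k : Int) : ∀ (l : List Int) (ans temp : Int),
    (∀ y ∈ l, y ≤ temp + k) → l.foldl (stepA k) (ans, temp) = (ans, temp) := by
  intro l
  induction l with
  | nil => intro ans temp _; simp
  | cons a l ih =>
    intro ans temp hall
    have ha : a ≤ temp + k := hall a (List.mem_cons_self)
    have : stepA k (ans, temp) a = (ans, temp) := by simp [stepA, not_lt.mpr ha]
    rw [List.foldl_cons, this]
    exact ih ans temp (fun y hy => hall y (List.mem_cons_of_mem _ hy))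

-- Main correspondence: A's linear scan from index i equals B's bisect loop
-- entered at the first boundary at or after i.
lemma mainLoop (s : List Int) (k : Int) (hs : s.Pairwise (· ≤ ·)) :
    ∀ (n i : Nat) (ans temp : Int), s.length - i ≤ n →
      ((s.drop i).foldl (stepA k) (ans, temp)).1
        = altLoop s k (bisR s (temp + k) i) ans := by
  intro n
  induction n with
  | zero =>
    intro i ans temp hn
    have hi : s.length ≤ i := by omega
    have hdrop : s.drop i = [] := List.drop_eq_nil_of_le hi
    obtain ⟨hb1, _, _⟩ := PySem.List.bisectRight_spec (s.drop i) (temp + k)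
      (List.Pairwise.sublist (List.drop_sublist i s) hs)
    rw [altLoop]
    have : ¬ bisR s (temp + k) i < s.length := by
      simp only [bisR]; omega
    simp [hdrop, this]
  | succ n ih =>
    intro i ans temp hn
    set d := s.drop i with hd
    set b := PySem.List.bisectRight d (temp + k) with hbdef
    obtain ⟨hb1, hb2, hb3⟩ := PySem.List.bisectRight_spec d (temp + k)
      (List.Pairwise.sublist (List.drop_sublist i s) hs)
    have hdl : d.length = s.length - i := by simp [hd]
    have hsplit : d = d.take b ++ d.drop b := (List.take_append_drop b d).symm
    have htake : (d.take b).foldl (stepA k) (ans, temp) = (ans, temp) := by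
      apply foldA_skip
      intro y hy
      obtain ⟨j, hj, rfl⟩ := List.getElem_of_mem hy
      have hjb : j < b := by
        have := hj; simp [List.length_take] at this; omega
      have hjd : j < d.length := by
        have := hj; simp [List.length_take] at this; omega
      rw [List.getElem_take]
      exact hb2 j hjd hjb
    have hskip : (d.foldl (stepA k) (ans, temp))
        = ((d.drop b).foldl (stepA k) (ans, temp)) := by
      conv_lhs => rw [hsplit]
      rw [List.foldl_append, htake]
    have hdb : d.drop b = s.drop (i + b) := by
      rw [hd, List.drop_drop]
    have hbis : bisR s (temp + k) i = i + b := by simp [bisR, hbdef, hd]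
    rw [hbis]
    by_cases hib : i + b < s.length
    · have hbd : b < d.length := by omega
      have hcons : s.drop (i + b) = s[i + b] :: s.drop (i + b + 1) :=
        List.drop_eq_getElem_cons hib
      have hgt : temp + k < s[i + b] := by
        have := hb3 b hbd (le_refl b)
        simpa only [hd, List.getElem_drop] using this
      have hstep : stepA k (ans, temp) s[i + b] = (ans + 1, s[i + b]) := by
        simp [stepA, hgt]
      rw [altLoop]
      simp only [hib, dif_pos]
      rw [hskip, hdb, hcons, List.foldl_cons, hstep]
      have := ih (i + b + 1) (ans + 1) (s[i + b]) (by omega)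
      simpa [bisR] using this
    · rw [altLoop]
      simp only [hib, dif_neg, not_false_iff]
      rw [hskip, hdb, List.drop_eq_nil_of_le (by omega)]
      simp

-- ===== VERDICT (by name: the statement is the Claim_ definition above) =====
theorem partitionArray_spec : Claim_equal_partitionArray := by
  intro nums k _ hpre
  unfold Spec_partitionArray partitionArray partitionArray_alt
  have hperm := PySem.List.sorted_perm nums (fun x => x) false
  have hpw : (PySem.List.sorted nums (fun x => x) false).Pairwise (· ≤ ·) := by
    simpa using PySem.List.sorted_pairwise nums (fun x => x)
  cases hcase : PySem.List.sorted nums (fun x => x) false with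
  | nil =>
    exact absurd ((hcase ▸ hperm).symm.eq_nil) hpre
  | cons t rest =>
    have hpw' : (t :: rest).Pairwise (· ≤ ·) := hcase ▸ hpw
    have := mainLoop (t :: rest) k hpw' (t :: rest).length 1 1 t (by omega)
    simpa using this
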